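-- pv_equiv track=rewrite | github.com/dawoodaijaz97/Leetcode | partition-array-into-k-distinct-groups/solution.py | solve
-- ===== SOURCE A (Python) =====
-- from collections import Counter
-- from typing import List
--
-- def solve(nums: List[int], k: int) -> bool:
--     if len(nums) % k != 0:
--         return False
--
--     count = Counter(nums)
--
--     for freq in count.values():
--         if freq % k != 0:
--             return False
--
--     return True
-- ===== SOURCE B (Python) =====
-- def solve(nums, k):
--     if len(nums) % k != 0:
--         return False
--     s = sorted(nums)
--     while s:
--         x = s[0]
--         run = 1
--         while run < len(s) and s[run] == x:
--             run += 1
--         if run % k != 0: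
--             return False
--         s = s[run:]
--     return True
-- ===== Notes on version B (the rewrite author's own statement) =====
-- stated objective: alternative
-- what changed: Replaces the Counter hash-map frequency table with a sort-then-scan: sort a copy of nums and walk the sorted list run by run of equal values, rejecting as soon as a run length is not divisible by k.
import Mathlib
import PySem

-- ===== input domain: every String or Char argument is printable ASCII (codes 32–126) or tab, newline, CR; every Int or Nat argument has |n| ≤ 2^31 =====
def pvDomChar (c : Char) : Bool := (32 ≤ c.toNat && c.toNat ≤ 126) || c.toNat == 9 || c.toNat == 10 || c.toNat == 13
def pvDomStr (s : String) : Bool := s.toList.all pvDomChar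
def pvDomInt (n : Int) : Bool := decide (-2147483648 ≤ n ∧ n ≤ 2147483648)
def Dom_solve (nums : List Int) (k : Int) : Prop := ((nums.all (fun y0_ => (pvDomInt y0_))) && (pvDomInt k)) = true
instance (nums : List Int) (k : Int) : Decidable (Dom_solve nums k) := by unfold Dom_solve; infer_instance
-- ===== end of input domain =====

-- B replaces A's Counter frequency table with a sort-then-scan over runs of equal values (alternative traversal, same results).


-- ===== PORT A =====
-- `if len(nums) % k != 0: return False`, then Counter(nums), then the for-loop
-- over count.values() with an early `return False` (= .all over the values).
def solve (nums : List Int) (k : Int) : Bool :=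
  if PySem.Int.mod (nums.length : Int) k ≠ 0 then false
  else
    (PySem.Dict.counter nums).values.all (fun freq => PySem.Int.mod freq k == 0)

-- ===== PORT B =====
-- inner `while run < len(s) and s[run] == x` starting from run = 1: counts the
-- prefix of the tail equal to the head.
def runLen (x : Int) : List Int → Nat
  | [] => 0
  | y :: ys => if y == x then runLen x ys + 1 else 0

-- outer `while s:` loop; `s = s[run:]` with run = 1 + runLen x ys.
def checkRuns (k : Int) : List Int → Bool
  | [] => true
  | x :: ys =>
    if PySem.Int.mod ((runLen x ys + 1 : Nat) : Int) k ≠ 0 then false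
    else checkRuns k (ys.drop (runLen x ys))
termination_by l => l.length
decreasing_by
  simp only [List.length_cons, List.length_drop]
  omega

def solve_alt (nums : List Int) (k : Int) : Bool :=
  if PySem.Int.mod (nums.length : Int) k ≠ 0 then false
  else checkRuns k (PySem.List.sorted nums (fun x => x) false)

-- ===== PRECONDITION & SPEC =====
-- Pre_ excludes exactly k = 0, where Python's `len(nums) % k` raises ZeroDivisionError in both A and B.
def Pre_solve (nums : List Int) (k : Int) : Prop := k ≠ 0
instance (nums : List Int) (k : Int) : Decidable (Pre_solve nums k) := by unfold Pre_solve; infer_instance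
def pvWitness_solve : List Int × Int := ([1, 2, 1, 2], 2)

def Spec_solve (nums : List Int) (k : Int) (out : Bool) : Prop := out = solve_alt nums k
instance (nums : List Int) (k : Int) (out : Bool) : Decidable (Spec_solve nums k out) := by unfold Spec_solve; infer_instance

-- ===== CLAIM (what is proved, stated in full; the proofs are below) =====
def Claim_equal_solve : Prop := ∀ (nums : List Int) (k : Int), Dom_solve nums k → Pre_solve nums k → Spec_solve nums k (solve nums k)

-- ===== LEMMAS AND PROOFS =====

theorem runLen_le (x : Int) (ys : List Int) : runLen x ys ≤ ys.length := by
  induction ys with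
  | nil => simp [runLen]
  | cons y t ih =>
    simp only [runLen, List.length_cons]
    split
    · omega
    · omega

-- A's value in logical form.
theorem solve_eq_true_iff (nums : List Int) (k : Int) :
    solve nums k = true ↔
      PySem.Int.mod (nums.length : Int) k = 0 ∧
        ∀ x ∈ nums, PySem.Int.mod (nums.count x) k = 0 := by
  unfold solve
  split
  · next hg => simp [hg]
  · next hg =>
    rw [not_not] at hg
    simp only [hg, true_and]
    rw [show (PySem.Dict.counter nums).values
          = ((PySem.Dict.counter nums).items).map (·.2) from rfl,
        PySem.Dict.items_counter]
    simp only [List.all_map, List.all_eq_true, Function.comp]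
    constructor
    · intro hall x hx
      have := hall x ((PySem.Set.mem_ofList nums x).mpr hx)
      simpa using this
    · intro hall x hx
      have := hall x ((PySem.Set.mem_ofList nums x).mp hx)
      simpa using this

-- every element of the counted prefix equals the head value
theorem take_runLen_eq (x : Int) (ys : List Int) :
    ∀ z ∈ ys.take (runLen x ys), z = x := by
  induction ys with
  | nil => simp
  | cons y t ih =>
    simp only [runLen]
    split
    · next h =>
      intro z hz
      simp only [List.take_succ_cons, List.mem_cons] at hz
      rcases hz with rfl | hz
      · exact beq_iff_eq.mp h
      · exact ih z hz
    · simp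

-- the head value does not occur after its run, on a sorted list
theorem not_mem_drop_runLen (x : Int) (ys : List Int)
    (h : (x :: ys).Pairwise (· ≤ ·)) : x ∉ ys.drop (runLen x ys) := by
  induction ys generalizing x with
  | nil => simp [runLen]
  | cons y t ih =>
    simp only [runLen]
    rcases List.pairwise_cons.mp h with ⟨hx, hyt⟩
    split
    · next hyx =>
      have hx' : (x :: t).Pairwise (· ≤ ·) := by
        rcases List.pairwise_cons.mp hyt with ⟨hy, ht⟩
        exact List.pairwise_cons.mpr ⟨fun z hz => (beq_iff_eq.mp hyx) ▸ hy z hz, ht⟩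
      simpa using ih x hx'
    · next hyx =>
      have hxy : x < y := lt_of_le_of_ne (hx y (by simp)) (fun e => hyx (by simp [e]))
      simp only [List.drop_zero, List.mem_cons]
      rintro (rfl | hxt)
      · exact absurd rfl (ne_of_lt hxy)
      · rcases List.pairwise_cons.mp hyt with ⟨hy, _⟩
        exact (not_le_of_gt hxy) (hy x hxt)

-- count of the head in the counted prefix is its full length
theorem count_take_runLen (x : Int) (ys : List Int) :
    (ys.take (runLen x ys)).count x = runLen x ys := by
  have hlen : (ys.take (runLen x ys)).length = runLen x ys :=
    List.length_take_of_le (runLen_le x ys)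
  calc (ys.take (runLen x ys)).count x
      = (ys.take (runLen x ys)).length := by
        apply List.count_eq_length.mpr
        intro z hz
        exact ((take_runLen_eq x ys) z hz) ▸ rfl
    _ = runLen x ys := hlen

-- count of the head in the tail = its run length, on a sorted list
theorem count_eq_runLen (x : Int) (ys : List Int)
    (h : (x :: ys).Pairwise (· ≤ ·)) : ys.count x = runLen x ys := by
  conv_lhs => rw [← List.take_append_drop (runLen x ys) ys]
  rw [List.count_append, count_take_runLen,
      List.count_eq_zero.mpr (not_mem_drop_runLen x ys h)]
  omega

-- counts of other values survive dropping the run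
theorem count_drop_runLen (x y : Int) (hne : y ≠ x) (ys : List Int) :
    (ys.drop (runLen x ys)).count y = ys.count y := by
  conv_rhs => rw [← List.take_append_drop (runLen x ys) ys]
  rw [List.count_append]
  have : (ys.take (runLen x ys)).count y = 0 := by
    apply List.count_eq_zero.mpr
    intro hmem
    exact hne (take_runLen_eq x ys y hmem)
  omega

-- membership of other values after the run
theorem mem_drop_runLen (x y : Int) (hne : y ≠ x) (ys : List Int) :
    y ∈ ys.drop (runLen x ys) ↔ y ∈ ys := by
  constructor
  · exact fun h => List.mem_of_mem_drop h
  · intro h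
    have : 0 < ys.count y := List.count_pos_iff.mpr h
    rw [← count_drop_runLen x y hne ys] at this
    exact List.count_pos_iff.mp this

-- count of another value ignores the head
theorem count_cons_ne (x y : Int) (hne : y ≠ x) (ys : List Int) :
    (x :: ys).count y = ys.count y := by
  simp [Ne.symm hne]

-- B's scan in logical form, on a sorted list
theorem checkRuns_eq_true_iff (k : Int) (s : List Int)
    (h : s.Pairwise (· ≤ ·)) :
    checkRuns k s = true ↔ ∀ x ∈ s, PySem.Int.mod (s.count x) k = 0 := by
  induction s using checkRuns.induct k with
  | case1 => rw [checkRuns]; simp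
  | case2 x ys hmod =>
    rw [checkRuns, if_pos hmod]
    simp only [Bool.false_eq_true, false_iff, not_forall]
    refine ⟨x, ⟨by simp, ?_⟩⟩
    rw [List.count_cons_self, count_eq_runLen x ys h]
    exact_mod_cast hmod
  | case3 x ys hmod ih =>
    rw [checkRuns, if_neg hmod]
    rw [not_not] at hmod
    have hdrop : (ys.drop (runLen x ys)).Pairwise (· ≤ ·) :=
      ((List.pairwise_cons.mp h).2).sublist (List.drop_sublist _ _)
    rw [ih hdrop]
    constructor
    · intro hall y hy
      by_cases hyx : y = x
      · subst hyx
        rw [List.count_cons_self, count_eq_runLen y ys h]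
        exact_mod_cast hmod
      · rcases List.mem_cons.mp hy with rfl | hyys
        · exact absurd rfl hyx
        · rw [count_cons_ne x y hyx ys, ← count_drop_runLen x y hyx ys]
          exact hall y ((mem_drop_runLen x y hyx ys).mpr hyys)
    · intro hall y hy
      have hyx : y ≠ x := fun e => not_mem_drop_runLen x ys h (e ▸ hy)
      rw [count_drop_runLen x y hyx ys, ← count_cons_ne x y hyx ys]
      exact hall y (List.mem_cons_of_mem x ((mem_drop_runLen x y hyx ys).mp hy))

-- B's value in logical form.
theorem solve_alt_eq_true_iff (nums : List Int) (k : Int) :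
    solve_alt nums k = true ↔
      PySem.Int.mod (nums.length : Int) k = 0 ∧
        ∀ x ∈ nums, PySem.Int.mod (nums.count x) k = 0 := by
  unfold solve_alt
  split
  · next hg => simp [hg]
  · next hg =>
    rw [not_not] at hg
    simp only [hg, true_and]
    have hperm : (PySem.List.sorted nums (fun x => x) false).Perm nums :=
      PySem.List.sorted_perm nums (fun x => x) false
    have hpw : (PySem.List.sorted nums (fun x => x) false).Pairwise (· ≤ ·) :=
      PySem.List.sorted_pairwise nums (fun x => x)
    rw [checkRuns_eq_true_iff k _ hpw]
    constructor
    · intro hall x hx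
      have := hall x (hperm.mem_iff.mpr hx)
      rwa [hperm.count_eq x] at this
    · intro hall x hx
      rw [hperm.count_eq x]
      exact hall x (hperm.mem_iff.mp hx)

-- ===== VERDICT (by name: the statement is the Claim_ definition above) =====
theorem solve_spec : Claim_equal_solve := by
  intro nums k _ _
  unfold Spec_solve
  rw [Bool.eq_iff_iff, solve_eq_true_iff, solve_alt_eq_true_iff]
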